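-- pv_equiv track=rewrite | github.com/Acidni-LLC/terprint-python | Terprint.Python/TerprintMenuDownload.py | extract_text_from_pdf2
-- ===== SOURCE A (Python) =====
-- def extract_text_from_pdf2(textin):
--     text = ""
--     percent = ""
--     terp = ""
--     counter =1
--     for line in textin.splitlines():
--         if counter == 1:
--             percent = line
--             counter = counter  + 1
--         elif counter == 2:
--             terp = line
--             counter = counter  + 1
--         elif counter == 3:
--             outputline = terp + " " + percent + "\n"
--             text = text + outputline
--             counter  =1
--     return text
-- ===== SOURCE B (Python) =====
-- def extract_text_from_pdf2(textin):
--     lines = textin.splitlines()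
--     return "".join(
--         terp + " " + percent + "\n"
--         for percent, terp, _ in zip(lines[0::3], lines[1::3], lines[2::3])
--     )
-- ===== Notes on version B (the rewrite author's own statement) =====
-- stated objective: idiomatic
-- what changed: Replaced A's per-line 1/2/3 counter state machine with a column decomposition: three strided slices lines[0::3], lines[1::3], lines[2::3] are zipped (truncating incomplete trailing groups automatically) and joined, so no mutable state is threaded through the scan.
import Mathlib
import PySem

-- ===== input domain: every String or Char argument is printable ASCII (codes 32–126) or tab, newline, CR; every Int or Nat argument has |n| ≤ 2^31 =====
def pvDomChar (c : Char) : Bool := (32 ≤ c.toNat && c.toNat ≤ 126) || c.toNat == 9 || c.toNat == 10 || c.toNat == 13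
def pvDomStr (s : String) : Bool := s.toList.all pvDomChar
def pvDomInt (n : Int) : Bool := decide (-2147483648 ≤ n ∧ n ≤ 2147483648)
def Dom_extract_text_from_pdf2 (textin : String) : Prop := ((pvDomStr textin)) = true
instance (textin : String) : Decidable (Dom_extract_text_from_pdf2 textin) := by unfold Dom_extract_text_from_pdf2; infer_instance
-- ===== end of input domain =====

-- B replaces A's per-line 1/2/3 counter state machine by a column decomposition:
-- zip the three strided slices lines[0::3], lines[1::3], lines[2::3] (zip truncation
-- drops incomplete trailing groups) and join the pieces (idiomatic; no mutable state).

-- ===== PORT A =====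
def pvAStep (s : String × String × String × Int) (line : String) : String × String × String × Int :=
  let (text, percent, terp, counter) := s
  if counter == 1 then (text, line, terp, counter + 1)
  else if counter == 2 then (text, percent, line, counter + 1)
  else if counter == 3 then (text ++ (terp ++ " " ++ percent ++ "\n"), percent, terp, 1)
  else s

def extract_text_from_pdf2 (textin : String) : String :=
  ((PySem.Str.splitlines textin).foldl pvAStep ("", "", "", 1)).1

-- ===== PORT B =====
def extract_text_from_pdf2_alt (textin : String) : String :=
  let lines := PySem.Str.splitlines textin
  let col0 := (PySem.List.slice? lines (some 0) none 3).getD []   -- lines[0::3]; step 3 ≠ 0, never none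
  let col1 := (PySem.List.slice? lines (some 1) none 3).getD []   -- lines[1::3]
  let col2 := (PySem.List.slice? lines (some 2) none 3).getD []   -- lines[2::3]
  PySem.Str.join "" ((col0.zip (col1.zip col2)).map
    (fun g => g.2.1 ++ " " ++ g.1 ++ "\n"))

-- ===== PRECONDITION & SPEC =====
def Spec_extract_text_from_pdf2 (textin : String) (out : String) : Prop := out = extract_text_from_pdf2_alt textin
instance (textin : String) (out : String) : Decidable (Spec_extract_text_from_pdf2 textin out) := by unfold Spec_extract_text_from_pdf2; infer_instance

-- ===== CLAIM =====
def Claim_equal_extract_text_from_pdf2 : Prop := ∀ (textin : String), Dom_extract_text_from_pdf2 textin → Spec_extract_text_from_pdf2 textin (extract_text_from_pdf2 textin)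

-- ===== LEMMAS AND PROOFS =====

-- reference shape: the joined pieces, one per complete triple of lines
def pvRef : List String → List String
  | percent :: terp :: _ :: rest => (terp ++ " " ++ percent ++ "\n") :: pvRef rest
  | _ => []

theorem pvJoinCons (x : List Char) (l : List (List Char)) :
    PySem.Chars.join [] (x :: l) = x ++ PySem.Chars.join [] l := by
  cases l with
  | nil => simp [PySem.Chars.join_singleton, PySem.Chars.join_nil]
  | cons y ys => simp [PySem.Chars.join_cons_cons]

-- A's counter fold produces text ++ join(pvRef l)
theorem pvKey : ∀ (l : List String) (text p t : String),
    (l.foldl pvAStep (text, p, t, 1)).1 = text ++ PySem.Str.join "" (pvRef l)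
  | [], text, p, t => by simp [pvRef, PySem.Str.join]
  | [a], text, p, t => by simp [pvAStep, pvRef, PySem.Str.join]
  | [a, b], text, p, t => by simp [pvAStep, pvRef, PySem.Str.join]
  | a :: b :: c :: rest, text, p, t => by
      simp only [List.foldl, pvAStep]
      norm_num
      rw [pvKey rest]
      simp only [pvRef, PySem.Str.join, List.map_cons]
      rw [← String.toList_inj]
      simp [pvJoinCons]

-- peel lemmas: a complete leading triple contributes one element to each column slice
theorem pvPeel0 {α : Type} (a b c : α) (r : List α) :
    (PySem.List.slice? (a :: b :: c :: r) (some 0) none 3).getD [] =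
      a :: (PySem.List.slice? r (some 0) none 3).getD [] := by
  simp only [PySem.List.slice?, PySem.List.sliceIndices]
  norm_num
  rw [show (min 0 ((r.length:Int) + 1 + 1 + 1)) = 0 from by omega]
  rw [if_pos (show (0:Int) ≤ ↑r.length + 1 + 1 from by omega)]
  rw [show ((↑r.length + 1 + 1 + 1 - 0 + 3 - 1 : Int) / 3).toNat
      = (if 0 < r.length then (((r.length:Int) + 3 - 1) / 3).toNat else 0) + 1 from by
    split_ifs with h <;> omega]
  rw [List.range_succ_eq_map]
  simp only [List.filterMap_cons, List.filterMap_map]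
  norm_num
  apply List.filterMap_congr
  intro x _
  rw [show ((3:Int) * (↑x + 1)).toNat = 3 * x + 3 from by omega]
  rw [show ((3:Int) * ↑x).toNat = 3 * x from by omega]
  simp

theorem pvPeel1 {α : Type} (a b c : α) (r : List α) :
    (PySem.List.slice? (a :: b :: c :: r) (some 1) none 3).getD [] =
      b :: (PySem.List.slice? r (some 1) none 3).getD [] := by
  simp only [PySem.List.slice?, PySem.List.sliceIndices]
  norm_num
  rw [show (min 1 ((r.length:Int) + 1 + 1 + 1)) = 1 from by omega]
  rw [if_pos (show (0:Int) ≤ ↑r.length + 1 from by omega)]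
  rw [show ((↑r.length + 1 + 1 + 1 - 1 + 3 - 1 : Int) / 3).toNat
      = (if 1 < r.length then (((r.length:Int) - min 1 ↑r.length + 3 - 1) / 3).toNat else 0) + 1 from by
    split_ifs with h <;> omega]
  rw [List.range_succ_eq_map]
  simp only [List.filterMap_cons, List.filterMap_map]
  norm_num
  apply List.filterMap_congr
  intro x hx
  simp only [List.mem_range] at hx
  have hL : 1 ≤ r.length := by by_contra h; simp [show ¬ (1 < r.length) from by omega] at hx
  rw [show (min 1 (r.length:Int)) = 1 from by omega]
  rw [show ((1:Int) + 3 * (↑x + 1)).toNat = (3 * x + 1) + 3 from by omega]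
  rw [show ((1:Int) + 3 * ↑x).toNat = 3 * x + 1 from by omega]
  simp

theorem pvPeel2 {α : Type} (a b c : α) (r : List α) :
    (PySem.List.slice? (a :: b :: c :: r) (some 2) none 3).getD [] =
      c :: (PySem.List.slice? r (some 2) none 3).getD [] := by
  simp only [PySem.List.slice?, PySem.List.sliceIndices]
  norm_num
  rw [if_pos (show (2:Int) ≤ ↑r.length + 1 + 1 from by omega)]
  rw [show (min 2 ((r.length:Int) + 1 + 1 + 1)) = 2 from by omega]
  rw [show ((↑r.length + 1 + 1 + 1 - 2 + 3 - 1 : Int) / 3).toNat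
      = (if 2 < r.length then (((r.length:Int) - min 2 ↑r.length + 3 - 1) / 3).toNat else 0) + 1 from by
    split_ifs with h <;> omega]
  rw [List.range_succ_eq_map]
  simp only [List.filterMap_cons, List.filterMap_map]
  rw [show ((a :: b :: c :: r)[((2:Int) + 3 * ((0:Nat):Int)).toNat]?) = some c from rfl]
  norm_num
  apply List.filterMap_congr
  intro x hx
  simp only [List.mem_range] at hx
  have hL : 2 ≤ r.length := by by_contra h; simp [show ¬ (2 < r.length) from by omega] at hx
  rw [show (min 2 (r.length:Int)) = 2 from by omega]
  rw [show ((2:Int) + 3 * (↑x + 1)).toNat = (3 * x + 2) + 3 from by omega]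
  rw [show ((2:Int) + 3 * ↑x).toNat = 3 * x + 2 from by omega]
  simp

-- zipping the three columns yields exactly the complete-triple pieces
theorem pvCols : ∀ l : List String,
    (((PySem.List.slice? l (some 0) none 3).getD []).zip
      (((PySem.List.slice? l (some 1) none 3).getD []).zip
        ((PySem.List.slice? l (some 2) none 3).getD []))).map
      (fun g => g.2.1 ++ " " ++ g.1 ++ "\n") = pvRef l
  | [] => by simp [PySem.List.slice?, PySem.List.sliceIndices, pvRef]
  | [a] => by
      rw [show (PySem.List.slice? [a] (some 2) none 3).getD [] = [] from by
        simp [PySem.List.slice?, PySem.List.sliceIndices]]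
      simp [pvRef]
  | [a, b] => by
      rw [show (PySem.List.slice? [a, b] (some 2) none 3).getD [] = [] from by
        simp [PySem.List.slice?, PySem.List.sliceIndices]]
      simp [pvRef]
  | a :: b :: c :: r => by
      rw [pvPeel0, pvPeel1, pvPeel2]
      simp only [List.zip_cons_cons, List.map_cons]
      rw [pvCols r]
      simp [pvRef]

-- ===== VERDICT =====
theorem extract_text_from_pdf2_spec : Claim_equal_extract_text_from_pdf2 := by
  intro textin _
  unfold Spec_extract_text_from_pdf2 extract_text_from_pdf2 extract_text_from_pdf2_alt
  rw [pvKey]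
  show "" ++ _ = PySem.Str.join "" _
  rw [pvCols]
  rw [← String.toList_inj]
  simp
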